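-- pv_equiv track=rewrite | github.com/jhz123-bot/legal-agentic-graphrag | src/evaluation/report_generator.py | _error_matrix_by_source_type
-- ===== SOURCE A (Python) =====
-- from collections import Counter
-- from typing import Any, Dict, List
--
-- def _error_matrix_by_source_type(error_records: List[Dict[str, Any]]) -> Dict[str, Dict[str, int]]:
--     matrix: Dict[str, Counter] = {}
--     for row in error_records:
--         stype = str(row.get("source_type", "unknown") or "unknown")
--         etype = str(row.get("primary_error_type", "none") or "none")
--         if etype == "none":
--             continue
--         matrix.setdefault(stype, Counter())
--         matrix[stype][etype] += 1
--     return {stype: dict(counter) for stype, counter in matrix.items()}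
-- ===== SOURCE B (Python) =====
-- from collections import Counter
-- from typing import Any, Dict, List, Optional, Tuple
--
--
-- def _pair(row: Dict[str, Any]) -> Optional[Tuple[str, str]]:
--     stype = str(row.get("source_type", "unknown") or "unknown")
--     etype = str(row.get("primary_error_type", "none") or "none")
--     return None if etype == "none" else (stype, etype)
--
--
-- def _error_matrix_by_source_type(error_records: List[Dict[str, Any]]) -> Dict[str, Dict[str, int]]:
--     pairs = [p for p in (_pair(row) for row in error_records) if p is not None]
--     flat = Counter(pairs)
--     uniq = list(dict.fromkeys(pairs))
--     stypes = list(dict.fromkeys(s for s, _ in pairs))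
--     return {s: {e: flat[s2, e] for (s2, e) in uniq if s2 == s} for s in stypes}
-- ===== Notes on version B (the rewrite author's own statement) =====
-- stated objective: alternative
-- what changed: Replaces the nested dict-of-Counters built by in-place mutation with an aggregate-then-reshape pipeline: one pass extracts normalized (source,error) pairs, a flat Counter keyed by pairs counts them, and the nested result is rebuilt by comprehensions over the first-occurrence-ordered distinct source types and pairs.
import Mathlib
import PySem

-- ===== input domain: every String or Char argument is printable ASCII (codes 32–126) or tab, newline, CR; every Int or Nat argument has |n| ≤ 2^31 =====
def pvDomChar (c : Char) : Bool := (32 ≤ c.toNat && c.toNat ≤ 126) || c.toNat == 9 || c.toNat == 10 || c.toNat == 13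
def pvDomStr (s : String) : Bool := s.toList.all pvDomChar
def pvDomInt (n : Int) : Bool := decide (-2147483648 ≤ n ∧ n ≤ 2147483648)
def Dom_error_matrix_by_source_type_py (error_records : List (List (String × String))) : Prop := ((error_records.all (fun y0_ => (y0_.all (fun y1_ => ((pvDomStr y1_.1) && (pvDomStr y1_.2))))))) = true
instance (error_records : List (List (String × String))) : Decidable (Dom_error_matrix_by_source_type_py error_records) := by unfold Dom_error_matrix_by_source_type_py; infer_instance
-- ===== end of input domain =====

-- B replaces A's nested dict-of-Counters mutated in place by an aggregate-then-reshape pipeline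
-- (flat pair Counter + comprehensions over first-occurrence-ordered distinct keys); same cost class.

-- str(row.get(k, dflt) or dflt): values are strings, str() is the identity, "" is the only falsy string,
-- and dict lookup on the association list is first match (exact for a Python dict, whose keys are unique).
def pvNorm (row : List (String × String)) (k dflt : String) : String :=
  match row.lookup k with
  | some v => if v = "" then dflt else v
  | none => dflt

-- ===== PORT A =====
-- the body of A's for-loop (matrix.setdefault(stype, Counter()); matrix[stype][etype] += 1)
def pvStepA (m : PySem.Dict String (PySem.Dict String Int)) (row : List (String × String)) :
    PySem.Dict String (PySem.Dict String Int) :=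
  let stype := pvNorm row "source_type" "unknown"
  let etype := pvNorm row "primary_error_type" "none"
  if etype = "none" then m
  else
    let m1 := m.setdefault stype PySem.Dict.empty
    m1.insert stype ((m1.getD stype PySem.Dict.empty).modify etype 0 (· + 1))

def error_matrix_by_source_type_py (error_records : List (List (String × String))) :
    List (String × List (String × Int)) :=
  let matrix := error_records.foldl pvStepA PySem.Dict.empty
  -- {stype: dict(counter) for stype, counter in matrix.items()}
  matrix.items.map (fun p => (p.1, p.2.items))

-- ===== PORT B =====
-- _pair(row): None if etype == "none" else (stype, etype)
def pvPair (row : List (String × String)) : Option (String × String) :=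
  let stype := pvNorm row "source_type" "unknown"
  let etype := pvNorm row "primary_error_type" "none"
  if etype = "none" then none else some (stype, etype)

def error_matrix_by_source_type_py_alt (error_records : List (List (String × String))) :
    List (String × List (String × Int)) :=
  let pairs := error_records.filterMap pvPair              -- [p for p in map(_pair, …) if p is not None]
  let flat := PySem.Dict.counter pairs                     -- Counter(pairs)
  let uniq := PySem.List.dedup pairs                       -- list(dict.fromkeys(pairs))
  let stypes := PySem.List.dedup (pairs.map (·.1))         -- list(dict.fromkeys(s for s, _ in pairs))
  stypes.map (fun s =>
    (s, (uniq.filter (fun p => p.1 == s)).map (fun p => (p.2, flat.getD p 0))))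

-- ===== PRECONDITION & SPEC =====
def Spec_error_matrix_by_source_type_py (error_records : List (List (String × String))) (out : List (String × List (String × Int))) : Prop := out = error_matrix_by_source_type_py_alt error_records
instance (error_records : List (List (String × String))) (out : List (String × List (String × Int))) : Decidable (Spec_error_matrix_by_source_type_py error_records out) := by unfold Spec_error_matrix_by_source_type_py; infer_instance

-- ===== CLAIM (what is proved, stated in full; the proofs are below) =====
def Claim_equal_error_matrix_by_source_type_py : Prop := ∀ (error_records : List (List (String × String))), Dom_error_matrix_by_source_type_py error_records → Spec_error_matrix_by_source_type_py error_records (error_matrix_by_source_type_py error_records)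

-- ===== LEMMAS AND PROOFS =====

-- A's loop step, restricted to the kept (stype, etype) pairs
def pvStepP (m : PySem.Dict String (PySem.Dict String Int)) (q : String × String) :
    PySem.Dict String (PySem.Dict String Int) :=
  let m1 := m.setdefault q.1 PySem.Dict.empty
  m1.insert q.1 ((m1.getD q.1 PySem.Dict.empty).modify q.2 0 (· + 1))

-- the inner dict (as an items list) produced for source type s from pair list ps
def pvInner (ps : List (String × String)) (s : String) : List (String × Int) :=
  ((PySem.Set.ofList ps).filter (fun p => p.1 == s)).map (fun p => (p.2, (ps.count p : Int)))

theorem pv_fold_filterMap (rows : List (List (String × String)))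
    (m : PySem.Dict String (PySem.Dict String Int)) :
    rows.foldl pvStepA m = (rows.filterMap pvPair).foldl pvStepP m := by
  induction rows generalizing m with
  | nil => rfl
  | cons r rows ih =>
    simp only [List.foldl_cons]
    by_cases h : pvNorm r "primary_error_type" "none" = "none"
    · have h1 : pvStepA m r = m := by simp [pvStepA, h]
      have h2 : pvPair r = none := by simp [pvPair, h]
      simp only [List.filterMap_cons, h2, h1]
      exact ih m
    · have h1 : pvStepA m r = pvStepP m (pvNorm r "source_type" "unknown", pvNorm r "primary_error_type" "none") := by
        simp [pvStepA, pvStepP, h]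
      have h2 : pvPair r = some (pvNorm r "source_type" "unknown", pvNorm r "primary_error_type" "none") := by
        simp [pvPair, h]
      simp only [List.filterMap_cons, h2, List.foldl_cons, h1]
      exact ih _

theorem pv_ofList_append_singleton {α : Type} [BEq α] [LawfulBEq α] (xs : List α) (x : α) :
    PySem.Set.ofList (xs ++ [x]) =
      if x ∈ xs then PySem.Set.ofList xs else PySem.Set.ofList xs ++ [x] := by
  rw [PySem.Set.ofList_append, PySem.Set.update_cons, PySem.Set.update_nil]
  simp [PySem.Set.add, PySem.Set.mem_ofList]

theorem pv_count_append_singleton {α : Type} [BEq α] [LawfulBEq α] [DecidableEq α] (l : List α) (a b : α) :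
    List.count a (l ++ [b]) = List.count a l + if a = b then 1 else 0 := by
  rw [List.count_append, List.count_singleton]
  by_cases h : a = b
  · subst h; simp
  · simp [h, Ne.symm h]


theorem pv_inner_ne (ps : List (String × String)) (q : String × String) (s : String)
    (hne : s ≠ q.1) : pvInner (ps ++ [q]) s = pvInner ps s := by
  unfold pvInner
  rw [pv_ofList_append_singleton]
  by_cases hq : q ∈ ps
  · rw [if_pos hq]
    apply List.map_congr_left
    intro p hp
    obtain ⟨hmem, hf⟩ := List.mem_filter.mp hp
    have hp1 : p.1 = s := by simpa using hf
    have hpq : p ≠ q := fun h => hne (by rw [← hp1, h])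
    rw [pv_count_append_singleton, if_neg hpq, Nat.add_zero]
  · rw [if_neg hq, List.filter_append]
    have hb : (q.1 == s) = false := by
      simp only [beq_eq_false_iff_ne]; exact fun h => hne h.symm
    have h1 : List.filter (fun p => p.1 == s) [q] = [] := by
      simp [List.filter, hb]
    rw [h1, List.append_nil]
    apply List.map_congr_left
    intro p hp
    obtain ⟨hmem, hf⟩ := List.mem_filter.mp hp
    have hpq : p ≠ q := fun h => hq (h ▸ (PySem.Set.mem_ofList ps p).mp hmem)
    rw [pv_count_append_singleton, if_neg hpq, Nat.add_zero]

theorem pv_main (ps : List (String × String)) :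
    (ps.foldl pvStepP PySem.Dict.empty).items =
      (PySem.Set.ofList (ps.map (·.1))).map
        (fun s => (s, PySem.Dict.mk (pvInner ps s))) := by
  induction ps using List.reverseRecOn with
  | nil => rfl
  | append_singleton ps q ih =>
    obtain ⟨s, e⟩ := q
    rw [List.foldl_append, List.foldl_cons, List.foldl_nil]
    set M := ps.foldl pvStepP PySem.Dict.empty with hM
    have hMeq : M = PySem.Dict.mk ((PySem.Set.ofList (ps.map (·.1))).map
        (fun s' => (s', PySem.Dict.mk (pvInner ps s')))) := PySem.Dict.ext ih
    have hkeys : M.keys = PySem.Set.ofList (ps.map (·.1)) := by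
      rw [hMeq, PySem.Dict.keys_mk, List.map_map]
      exact (List.map_congr_left fun a _ => rfl).trans (List.map_id _)
    have hnodup : M.keys.Nodup := by rw [hkeys]; exact PySem.Set.nodup_ofList _
    have hcont : M.contains s = true ↔ s ∈ ps.map (·.1) := by
      rw [PySem.Dict.contains_iff_mem_keys, hkeys, PySem.Set.mem_ofList]
    rw [List.map_append]
    simp only [List.map_cons, List.map_nil]
    rw [pv_ofList_append_singleton]
    by_cases hs : s ∈ ps.map (·.1)
    · rw [if_pos hs]
      have hc : M.contains s = true := hcont.mpr hs
      have hmemItem : (s, PySem.Dict.mk (pvInner ps s)) ∈ M.items := by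
        rw [hMeq]
        exact List.mem_map_of_mem ((PySem.Set.mem_ofList _ _).mpr hs)
      have hgd : M.getD s PySem.Dict.empty = PySem.Dict.mk (pvInner ps s) :=
        PySem.Dict.getD_of_mem_items M hmemItem hnodup _
      have hfilset : ∀ p ∈ (PySem.Set.ofList ps).filter (fun p => p.1 == s), p.1 = s := by
        intro p hp
        have := (List.mem_filter.mp hp).2
        simpa using this
      have hfilmem : ∀ p ∈ (PySem.Set.ofList ps).filter (fun p => p.1 == s), p ∈ ps := by
        intro p hp
        exact (PySem.Set.mem_ofList _ _).mp (List.mem_filter.mp hp).1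
      have hkeysInner : (PySem.Dict.mk (pvInner ps s)).keys
          = ((PySem.Set.ofList ps).filter (fun p => p.1 == s)).map (·.2) := by
        rw [PySem.Dict.keys_mk]
        unfold pvInner
        rw [List.map_map]
        rfl
      have hmemInnerKey : ∀ x, x ∈ (PySem.Dict.mk (pvInner ps s)).keys → (s, x) ∈ ps := by
        intro x hx
        rw [hkeysInner] at hx
        obtain ⟨p, hpfil, hpx⟩ := List.mem_map.mp hx
        obtain ⟨p1, p2⟩ := p
        have h1 : p1 = s := hfilset _ hpfil
        have h2 : p2 = x := hpx
        have := hfilmem _ hpfil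
        rwa [h1, h2] at this
      have hnodupInner : (PySem.Dict.mk (pvInner ps s)).keys.Nodup := by
        rw [hkeysInner]
        apply List.Nodup.map_on
        · intro x hx y hy hxy
          obtain ⟨x1, x2⟩ := x
          obtain ⟨y1, y2⟩ := y
          have hx1 : x1 = s := hfilset _ hx
          have hy1 : y1 = s := hfilset _ hy
          simp only at hxy
          rw [hx1, hy1, hxy]
        · exact (PySem.Set.nodup_ofList ps).filter _
      have hstep : (pvStepP M (s, e)).items = M.items.map (fun p => if p.1 == s then
          (s, (PySem.Dict.mk (pvInner ps s)).insert e
            ((PySem.Dict.mk (pvInner ps s)).getD e 0 + 1)) else p) := by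
        show ((M.setdefault s PySem.Dict.empty).insert s
          (((M.setdefault s PySem.Dict.empty).getD s PySem.Dict.empty).modify e 0 (· + 1))).items = _
        rw [PySem.Dict.setdefault_of_contains M _ hc, hgd]
        exact PySem.Dict.items_insert_of_contains M _ hc
      rw [hstep, ih, List.map_map]
      apply List.map_congr_left
      intro s' hs'
      by_cases h' : s' = s
      · subst h'
        simp only [Function.comp_apply, beq_self_eq_true, if_pos]
        refine congrArg (fun d => (s', d)) (PySem.Dict.ext ?_)
        by_cases hq : (s', e) ∈ ps
        · -- the pair already occurs: in-place bump of the count at e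
          have hqfil : (s', e) ∈ (PySem.Set.ofList ps).filter (fun p => p.1 == s') :=
            List.mem_filter.mpr ⟨(PySem.Set.mem_ofList _ _).mpr hq, by simp⟩
          have hmemE : (e, (ps.count (s', e) : Int)) ∈ pvInner ps s' :=
            List.mem_map_of_mem hqfil
          have hgdE : (PySem.Dict.mk (pvInner ps s')).getD e 0 = (ps.count (s', e) : Int) :=
            PySem.Dict.getD_of_mem_items _ hmemE hnodupInner 0
          have hcE : (PySem.Dict.mk (pvInner ps s')).contains e = true := by
            rw [PySem.Dict.contains_iff_mem_keys, hkeysInner]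
            exact List.mem_map_of_mem hqfil
          rw [PySem.Dict.items_insert_of_contains _ _ hcE, hgdE]
          show _ = pvInner (ps ++ [(s', e)]) s'
          unfold pvInner
          rw [pv_ofList_append_singleton, if_pos hq, List.map_map]
          apply List.map_congr_left
          intro p hp
          obtain ⟨p1, p2⟩ := p
          have hp1 : p1 = s' := hfilset _ hp
          subst hp1
          by_cases hpe : p2 = e
          · subst hpe
            simp only [Function.comp_apply, beq_self_eq_true, if_pos]
            rw [pv_count_append_singleton, if_pos rfl]
            push_cast
            ring_nf
          · have hne : ((p1, p2) : String × String) ≠ (p1, e) := by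
              simp [hpe]
            simp only [Function.comp_apply]
            rw [if_neg (by simpa using hpe)]
            rw [pv_count_append_singleton, if_neg hne, Nat.add_zero]
        · -- fresh pair for an existing source type: the inner dict appends (e, 1)
          have hcE : (PySem.Dict.mk (pvInner ps s')).contains e = false := by
            rw [Bool.eq_false_iff]
            intro h
            exact hq (hmemInnerKey e ((PySem.Dict.contains_iff_mem_keys _ _).mp h))
          rw [PySem.Dict.items_insert_of_not_contains _ _ hcE,
            PySem.Dict.getD_of_not_contains _ _ hcE]
          show _ = pvInner (ps ++ [(s', e)]) s'
          unfold pvInner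
          rw [pv_ofList_append_singleton, if_neg hq, List.filter_append]
          have hfq : List.filter (fun p => p.1 == s') [(s', e)] = [(s', e)] := by simp
          rw [hfq, List.map_append]
          congr 1
          · apply List.map_congr_left
            intro p hp
            have hpq : p ≠ (s', e) := fun h => hq (h ▸ hfilmem _ hp)
            rw [pv_count_append_singleton, if_neg hpq, Nat.add_zero]
          · have h00 : List.count (s', e) ps = 0 := List.count_eq_zero.mpr hq
            simp only [List.map_cons, List.map_nil]
            rw [pv_count_append_singleton, if_pos rfl, h00]
            norm_num
      · simp only [Function.comp_apply]
        rw [if_neg (by simpa using h'), pv_inner_ne ps (s, e) s' h']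
    · rw [if_neg hs]
      have hq : (s, e) ∉ ps := fun h => hs (List.mem_map_of_mem h)
      have hc : M.contains s = false := by
        rw [Bool.eq_false_iff]; intro h; exact hs (hcont.mp h)
      have hstep : (pvStepP M (s, e)).items =
          M.items ++ [(s, PySem.Dict.empty.insert e (PySem.Dict.empty.getD e 0 + 1))] := by
        show ((M.setdefault s PySem.Dict.empty).insert s
          (((M.setdefault s PySem.Dict.empty).getD s PySem.Dict.empty).modify e 0 (· + 1))).items = _
        rw [PySem.Dict.setdefault_of_not_contains M _ hc, PySem.Dict.getD_insert_self]
        rw [PySem.Dict.items_insert_of_contains _ _ (PySem.Dict.contains_insert_self M s PySem.Dict.empty)]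
        rw [PySem.Dict.items_insert_of_not_contains M _ hc, List.map_append]
        congr 1
        · apply (List.map_congr_left _).trans (List.map_id _)
          intro p hp
          have hp1 : p.1 ∈ M.keys := by
            show p.1 ∈ M.items.map (·.1); exact List.mem_map_of_mem hp
          have : p.1 ≠ s := by
            rw [hkeys, PySem.Set.mem_ofList] at hp1; exact fun h => hs (h ▸ hp1)
          simp [this]
        · simp [PySem.Dict.modify]
      rw [hstep, List.map_append]
      congr 1
      · rw [ih]
        apply List.map_congr_left
        intro s' hs'
        have : s' ≠ s := fun h =>
          hs (h ▸ (PySem.Set.mem_ofList _ _).mp hs')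
        rw [pv_inner_ne ps (s, e) s' this]
      · have hgd0 : PySem.Dict.empty.getD e (0 : Int) = 0 := PySem.Dict.getD_empty e 0
        have hins : (PySem.Dict.empty.insert e ((0 : Int) + 1)).items = [(e, (0 : Int) + 1)] := by
          rw [PySem.Dict.items_insert_of_not_contains _ _ (PySem.Dict.contains_empty e)]; rfl
        have hinner : pvInner (ps ++ [(s, e)]) s = [(e, (0 : Int) + 1)] := by
          unfold pvInner
          rw [pv_ofList_append_singleton, if_neg hq, List.filter_append]
          have h0 : ((PySem.Set.ofList ps).filter (fun p => p.1 == s)) = [] := by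
            rw [List.filter_eq_nil_iff]
            intro p hp
            have : p.1 ∈ ps.map (·.1) :=
              List.mem_map_of_mem ((PySem.Set.mem_ofList _ _).mp hp)
            simp only [beq_iff_eq]
            exact fun h => hs (h ▸ this)
          rw [h0, List.nil_append]
          have h00 : List.count (s, e) ps = 0 := List.count_eq_zero.mpr hq
          have hcnt : (ps ++ [(s, e)]).count (s, e) = 1 := by
            rw [pv_count_append_singleton, h00]
            simp
          simp [h00]
        rw [hgd0]
        simp only [List.map_cons, List.map_nil]
        rw [hinner]
        exact congrArg (fun d => [(s, d)]) (PySem.Dict.ext hins)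

-- ===== VERDICT (by name: the statement is the Claim_ definition above) =====
theorem error_matrix_by_source_type_py_spec : Claim_equal_error_matrix_by_source_type_py := by
  intro rows _
  show _ = _
  dsimp only [error_matrix_by_source_type_py, error_matrix_by_source_type_py_alt]
  rw [pv_fold_filterMap, pv_main]
  simp only [List.map_map, PySem.List.dedup, PySem.Dict.getD_counter]
  rfl
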